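-- pv_equiv track=rewrite | github.com/Slangoij/PlayData_Algorithm_Study | 알고리즘 스터디 4차 코테/02.식단 짜기.py | solution
-- ===== SOURCE A (Python) =====
-- def solution(diet, breakfast, lunch):
--     for i in breakfast:
--         if i not in diet:
--             return "CHEATER"
--         diet = diet.replace(i, '')
--
--     for i in lunch:
--         if i not in diet:
--             return "CHEATER"
--         diet = diet.replace(i, '')
--
--     diet_lst = list(diet)
--     diet_lst.sort()
--     return ''.join(diet_lst)
-- ===== SOURCE B (Python) =====
-- def solution(diet, breakfast, lunch):
--     dset = set(diet)
--     seen = set()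
--     for c in breakfast + lunch:
--         if c in seen or c not in dset:
--             return "CHEATER"
--         seen.add(c)
--     return ''.join(sorted(c for c in diet if c not in seen))
-- ===== Notes on version B (the rewrite author's own statement) =====
-- stated objective: alternative
-- what changed: B replaces A's repeated substring scans and full-string replace() per eaten character with one pass over breakfast+lunch using a seen-set and a precomputed set of diet's characters, then a single filter+sort of diet; duplicates/missing characters are detected by set membership instead of rescanning the shrinking diet string.
import Mathlib
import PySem

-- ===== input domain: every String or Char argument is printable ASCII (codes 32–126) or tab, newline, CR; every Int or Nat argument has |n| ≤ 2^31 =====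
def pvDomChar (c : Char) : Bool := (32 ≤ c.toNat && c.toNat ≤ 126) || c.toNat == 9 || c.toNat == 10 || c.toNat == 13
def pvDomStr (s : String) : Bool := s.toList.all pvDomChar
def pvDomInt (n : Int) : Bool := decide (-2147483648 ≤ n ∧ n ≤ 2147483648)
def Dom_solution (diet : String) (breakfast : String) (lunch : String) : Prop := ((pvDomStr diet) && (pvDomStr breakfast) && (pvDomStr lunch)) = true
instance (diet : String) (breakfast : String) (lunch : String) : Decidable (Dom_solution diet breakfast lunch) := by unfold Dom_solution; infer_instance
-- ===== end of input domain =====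

-- B replaces A's per-character rescans/replace() of the shrinking diet with one pass over
-- breakfast+lunch maintaining a seen-set against a precomputed set of diet's characters,
-- then one filter+sort of diet (alternative single-pass algorithm).

-- ===== PORT A =====
-- the 'for i in meal: if i not in diet: return "CHEATER"; diet = diet.replace(i, '')' loop
-- (replace with '' removes ALL occurrences = filter); none = early return "CHEATER"
def eatA : List Char → List Char → Option (List Char)
  | d, [] => some d
  | d, c :: cs => if c ∈ d then eatA (d.filter (fun x => x ≠ c)) cs else none

def solution (diet : String) (breakfast : String) (lunch : String) : String :=
  match eatA diet.toList breakfast.toList with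
  | none => "CHEATER"
  | some d1 =>
    match eatA d1 lunch.toList with
    | none => "CHEATER"
    | some d2 => String.ofList (PySem.List.sorted d2 (fun x => x) false)

-- ===== PORT B =====
-- one pass over breakfast+lunch: CHEATER if the char was already eaten or is not in diet's char set
def eatB (dset : PySem.Set Char) : PySem.Set Char → List Char → Option (PySem.Set Char)
  | seen, [] => some seen
  | seen, c :: cs =>
    if PySem.Set.contains seen c || !(PySem.Set.contains dset c) then none
    else eatB dset (PySem.Set.add seen c) cs

def solution_alt (diet : String) (breakfast : String) (lunch : String) : String :=
  match eatB (PySem.Set.ofList diet.toList) PySem.Set.empty (breakfast.toList ++ lunch.toList) with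
  | none => "CHEATER"
  | some seen =>
    String.ofList (PySem.List.sorted (diet.toList.filter (fun c => !(PySem.Set.contains seen c))) (fun x => x) false)

-- ===== PRECONDITION & SPEC =====
def Spec_solution (diet : String) (breakfast : String) (lunch : String) (out : String) : Prop := out = solution_alt diet breakfast lunch
instance (diet : String) (breakfast : String) (lunch : String) (out : String) : Decidable (Spec_solution diet breakfast lunch out) := by unfold Spec_solution; infer_instance

-- ===== CLAIM (what is proved, stated in full; the proofs are below) =====
def Claim_equal_solution : Prop := ∀ (diet : String) (breakfast : String) (lunch : String), Dom_solution diet breakfast lunch → Spec_solution diet breakfast lunch (solution diet breakfast lunch)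

-- ===== LEMMAS AND PROOFS =====

-- splitting the eaten chars: A's two loops = one loop over the concatenation
theorem eatA_append (as bs : List Char) : ∀ d, eatA d (as ++ bs) = (eatA d as).bind (fun d' => eatA d' bs) := by
  induction as with
  | nil => intro d; simp [eatA]
  | cons c cs ih =>
    intro d
    simp only [List.cons_append, eatA]
    split <;> simp [ih]

-- invariant: A's shrinking diet is diet filtered by B's seen-set
theorem eatA_eq_eatB (diet : List Char) :
    ∀ (cs : List Char) (seen : PySem.Set Char),
      eatA (diet.filter (fun x => !(PySem.Set.contains seen x))) cs
        = (eatB (PySem.Set.ofList diet) seen cs).map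
            (fun s => diet.filter (fun x => !(PySem.Set.contains s x))) := by
  intro cs
  induction cs with
  | nil => intro seen; simp [eatA, eatB]
  | cons c cs ih =>
    intro seen
    simp only [eatA, eatB]
    by_cases hs : c ∈ (seen : List Char)
    · have h1 : c ∉ diet.filter (fun x => !(PySem.Set.contains seen x)) := by
        simp [List.mem_filter, PySem.Set.contains]
        intro _; exact hs
      rw [if_neg h1, if_pos (by simp [PySem.Set.contains, hs])]
      rfl
    · by_cases hd : c ∈ diet
      · have h1 : c ∈ diet.filter (fun x => !(PySem.Set.contains seen x)) := by
          simp [List.mem_filter, PySem.Set.contains, hd, hs]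
        have h2 : (PySem.Set.contains seen c || !(PySem.Set.contains (PySem.Set.ofList diet) c)) = false := by
          simp [PySem.Set.contains, hs, List.contains_eq_mem, PySem.Set.mem_ofList, hd]
        rw [if_pos h1, h2, if_neg (by simp)]
        have hf : (diet.filter (fun x => !(PySem.Set.contains seen x))).filter (fun x => x ≠ c)
            = diet.filter (fun x => !(PySem.Set.contains (PySem.Set.add seen c) x)) := by
          rw [List.filter_filter]
          apply List.filter_congr
          intro x _
          by_cases hx1 : x = c <;> by_cases hx2 : x ∈ (seen : List Char) <;>
            simp [PySem.Set.contains, List.contains_eq_mem, PySem.Set.mem_add, hx1, hx2]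
        rw [hf, ih]
      · have h1 : c ∉ diet.filter (fun x => !(PySem.Set.contains seen x)) := by
          simp [List.mem_filter]
          intro h; exact absurd h hd
        rw [if_neg h1, if_pos (by simp [PySem.Set.contains, List.contains_eq_mem, PySem.Set.mem_ofList, hd])]
        rfl

-- ===== VERDICT (by name: the statement is the Claim_ definition above) =====
theorem solution_spec : Claim_equal_solution := by
  intro diet breakfast lunch _
  unfold Spec_solution solution solution_alt
  have key := eatA_eq_eatB diet.toList (breakfast.toList ++ lunch.toList) PySem.Set.empty
  have h0 : diet.toList.filter (fun x => !(PySem.Set.contains PySem.Set.empty x)) = diet.toList := by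
    simp [PySem.Set.contains, PySem.Set.empty]
  rw [h0, eatA_append] at key
  cases hE : eatB (PySem.Set.ofList diet.toList) PySem.Set.empty (breakfast.toList ++ lunch.toList) with
  | none =>
    rw [hE] at key; simp only [Option.map_none] at key
    cases hA : eatA diet.toList breakfast.toList with
    | none => rfl
    | some d1 =>
      rw [hA, Option.bind_some] at key
      simp [key]
  | some s =>
    rw [hE] at key; simp only [Option.map_some] at key
    cases hA : eatA diet.toList breakfast.toList with
    | none => rw [hA] at key; simp at key
    | some d1 =>
      rw [hA, Option.bind_some] at key
      simp [key]
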